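-- pv_equiv track=rewrite | github.com/ablarer/Codility | Exercises/07_Data Structures/07b_Data_Structures.py | solution_version_2
-- ===== SOURCE A (Python) =====
-- def solution_version_2(K, A):
-- # Implement your solution here
--     def triangular(i):
--         return (i * (i + 1)) // 2
--
--
--     i = 0
--     result = 0
--
--     while i < len(A):
--         lower = A[i]
--         upper = A[i]
--         countBackw = 0
--         countForw = 0
--
--         j = i - 1
--         while j >= 0:
--             if A[j] < lower:
--                 if upper - A[j] > K:
--                     break
--                 else:
--                     lower = A[j]
--             elif A[j] > upper:
--                 if A[j] - lower > K:
--                     break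
--                 else:
--                     upper = A[j]
--             countBackw += 1
--             j -= 1
--
--         j = i
--         while j < len(A):
--             if A[j] < lower:
--                 if upper - A[j] > K:
--                     break
--                 else:
--                     lower = A[j]
--             elif A[j] > upper:
--                 if A[j] - lower > K:
--                     break
--                 else:
--                     upper = A[j]
--             countForw += 1
--             j += 1
--
--         result -= triangular(countBackw)
--         result += triangular(countForw + countBackw)
--         i += countForw
--
--     return result
-- ===== SOURCE B (Python) =====
-- def solution_version_2(K, A):
--     # Sliding-window count: for each right endpoint add (right - left + 1), where
--     # left is the smallest start keeping the window's max - min <= max(K, 0).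
--     # The window's min/max are maintained O(1) amortized with a queue made of two
--     # stacks whose entries cache the max and min of everything below them.
--     keff = K if K > 0 else 0
--     front = []  # stack of (value, cached_max, cached_min); top = oldest window part
--     back = []   # stack of (value, cached_max, cached_min); top = newest element
--     left = 0
--     res = 0
--     for right in range(len(A)):
--         v = A[right]
--         if back:
--             _, m, n = back[-1]
--             back.append((v, max(v, m), min(v, n)))
--         else:
--             back.append((v, v, v))
--         while True:
--             if front and back:
--                 mx = max(front[-1][1], back[-1][1])
--                 mn = min(front[-1][2], back[-1][2])
--             elif front:
--                 mx, mn = front[-1][1], front[-1][2]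
--             else:
--                 mx, mn = back[-1][1], back[-1][2]
--             if mx - mn <= keff:
--                 break
--             if not front:
--                 while back:
--                     w = back.pop()[0]
--                     if front:
--                         _, m, n = front[-1]
--                         front.append((w, max(w, m), min(w, n)))
--                     else:
--                         front.append((w, w, w))
--             front.pop()
--             left += 1
--         res += right - left + 1
--     return res
-- ===== Notes on version B (the rewrite author's own statement) =====
-- stated objective: faster
-- what changed: Replaces A's block-jumping double scan (backward+forward expansion around each anchor with triangular-number bookkeeping) by the classic sliding-window counter: two pointers, adding right-left+1 per right endpoint, with window min/max maintained O(1) amortized by a min/max-cached two-stack queue and keff=max(K,0).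
import Mathlib
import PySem

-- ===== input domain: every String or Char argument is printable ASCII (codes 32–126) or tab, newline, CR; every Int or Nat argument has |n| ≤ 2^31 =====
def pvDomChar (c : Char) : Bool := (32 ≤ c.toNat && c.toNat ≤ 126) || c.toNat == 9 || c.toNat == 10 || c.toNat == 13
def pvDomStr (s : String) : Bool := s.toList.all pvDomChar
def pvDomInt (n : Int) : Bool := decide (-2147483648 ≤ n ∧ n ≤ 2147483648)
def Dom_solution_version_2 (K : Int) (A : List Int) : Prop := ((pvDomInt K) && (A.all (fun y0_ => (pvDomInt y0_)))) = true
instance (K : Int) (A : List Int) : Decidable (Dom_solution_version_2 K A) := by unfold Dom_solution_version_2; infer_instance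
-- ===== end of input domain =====

-- B is the classic sliding-window counter (two pointers, window min/max kept by a
-- min/max-cached two-stack queue) instead of A's block-jumping double scan; objective: faster.

-- ===== PORT A =====
-- A's inner helper triangular(i) = (i*(i+1))//2 (Python floor division).
def pyTri (i : Int) : Int := PySem.Int.floordiv (i * (i + 1)) 2

-- A's backward while loop: fuel argument j+1 means "current Python index j"
-- (the loop runs j down to 0; indices are always in range, so getD is exact).
def backLoop (K : Int) (A : List Int) : Nat → Int → Int → Nat → Int × Int × Nat
  | 0, lower, upper, cnt => (lower, upper, cnt)
  | j + 1, lower, upper, cnt =>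
    let a := A.getD j 0
    if a < lower then
      if upper - a > K then (lower, upper, cnt)
      else backLoop K A j a upper (cnt + 1)
    else if a > upper then
      if a - lower > K then (lower, upper, cnt)
      else backLoop K A j lower a (cnt + 1)
    else backLoop K A j lower upper (cnt + 1)

-- A's forward while loop: j runs up while j < len(A); fuel = len(A) - j.
def fwdLoop (K : Int) (A : List Int) : Nat → Nat → Int → Int → Nat → Int × Int × Nat
  | 0, _, lower, upper, cnt => (lower, upper, cnt)
  | fuel + 1, j, lower, upper, cnt =>
    let a := A.getD j 0
    if a < lower then
      if upper - a > K then (lower, upper, cnt)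
      else fwdLoop K A fuel (j + 1) a upper (cnt + 1)
    else if a > upper then
      if a - lower > K then (lower, upper, cnt)
      else fwdLoop K A fuel (j + 1) lower a (cnt + 1)
    else fwdLoop K A fuel (j + 1) lower upper (cnt + 1)

-- A's outer while loop; i advances by countForw ≥ 1 each pass, so fuel = len(A) suffices.
def outerLoop (K : Int) (A : List Int) : Nat → Nat → Int → Int
  | 0, _, res => res
  | fuel + 1, i, res =>
    if i < A.length then
      let a := A.getD i 0
      let (lo, hi, b) := backLoop K A i a a 0
      let (_, _, f) := fwdLoop K A (A.length - i) i lo hi 0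
      outerLoop K A fuel (i + f) (res - pyTri (b : Int) + pyTri ((f : Int) + (b : Int)))
    else res

def solution_version_2 (K : Int) (A : List Int) : Int :=
  outerLoop K A A.length 0 0

-- ===== PORT B =====
-- Stacks hold (value, cached max of stack, cached min of stack); head = top.
def pushQ (v : Int) (s : List (Int × Int × Int)) : List (Int × Int × Int) :=
  match s with
  | [] => [(v, v, v)]
  | (w, m, n) :: t => (v, max v m, min v n) :: (w, m, n) :: t

-- Python's inner "while back: front.append(back.pop())" move loop.
def moveAll : List (Int × Int × Int) → List (Int × Int × Int) → List (Int × Int × Int)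
  | [], front => front
  | e :: t, front => moveAll t (pushQ e.1 front)

-- Python's "if front and back / elif front / else" max-min read of the queue.
def comboQ (front back : List (Int × Int × Int)) : Int × Int :=
  match front, back with
  | f :: _, b :: _ => (max f.2.1 b.2.1, min f.2.2 b.2.2)
  | f :: _, [] => (f.2.1, f.2.2)
  | [], b :: _ => (b.2.1, b.2.2)
  | [], [] => (0, 0)  -- unreachable: the window always contains the just-pushed element

-- B's "while True: … break / advance left" loop; fuel right+1-left suffices since
-- left never passes right (a one-element window is always valid).
def advLoop (keff : Int) : Nat → Nat → List (Int × Int × Int) → List (Int × Int × Int) →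
    Nat × List (Int × Int × Int) × List (Int × Int × Int)
  | 0, left, front, back => (left, front, back)
  | fuel + 1, left, front, back =>
    let (mx, mn) := comboQ front back
    if mx - mn ≤ keff then (left, front, back)
    else
      match front with
      | [] => advLoop keff fuel (left + 1) (moveAll back []).tail []
      | _ :: ft => advLoop keff fuel (left + 1) ft back

-- B's main "for right in range(len(A))" loop, structurally over the list.
def mainLoop (keff : Int) : List Int → Nat → Nat → List (Int × Int × Int) →
    List (Int × Int × Int) → Int → Int
  | [], _, _, _, _, res => res
  | v :: rest, right, left, front, back, res =>
    let back' := pushQ v back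
    let (left', front', back'') := advLoop keff (right + 1 - left) left front back'
    mainLoop keff rest (right + 1) left' front' back'' (res + ((right : Int) - (left' : Int) + 1))

def solution_version_2_alt (K : Int) (A : List Int) : Int :=
  mainLoop (if K > 0 then K else 0) A 0 0 [] [] 0

-- ===== PRECONDITION & SPEC =====
def Spec_solution_version_2 (K : Int) (A : List Int) (out : Int) : Prop := out = solution_version_2_alt K A
instance (K : Int) (A : List Int) (out : Int) : Decidable (Spec_solution_version_2 K A out) := by unfold Spec_solution_version_2; infer_instance

-- ===== CLAIM (what is proved, stated in full; the proofs are below) =====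
def Claim_equal_solution_version_2 : Prop := ∀ (K : Int) (A : List Int), Dom_solution_version_2 K A → Spec_solution_version_2 K A (solution_version_2 K A)

-- ===== LEMMAS AND PROOFS =====

-- Below: proof infrastructure. g = Python's in-range A[t]; ke = max(K,0);
-- valid K A l r = every pair in A[l..r] differs by at most ke.
def g (A : List Int) (t : Nat) : Int := A.getD t 0
def ke (K : Int) : Int := max K 0
def valid (K : Int) (A : List Int) (l r : Nat) : Prop :=
  ∀ p < r + 1, ∀ q < r + 1, l ≤ p → l ≤ q → g A p - g A q ≤ ke K

def validDec (K : Int) (A : List Int) (l r : Nat) : Decidable (valid K A l r) := by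
  unfold valid; infer_instance

lemma ke_nonneg (K : Int) : 0 ≤ ke K := le_max_right _ _

lemma valid_refl (K : Int) (A : List Int) (r : Nat) : valid K A r r := by
  intro p hp q hq hlp hlq
  have : p = r := by omega
  have hq' : q = r := by omega
  subst this; subst hq'
  simpa using ke_nonneg K

lemma valid_mono {K : Int} {A : List Int} {l l' r r' : Nat}
    (hl : l ≤ l') (hr : r' ≤ r) (h : valid K A l r) : valid K A l' r' := by
  intro p hp q hq hlp hlq
  exact h p (by omega) q (by omega) (by omega) (by omega)

lemma exists_valid (K : Int) (A : List Int) (r : Nat) : ∃ l, valid K A l r :=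
  ⟨r, valid_refl K A r⟩

def L (K : Int) (A : List Int) (r : Nat) : Nat :=
  @Nat.find (fun l => valid K A l r) (fun l => validDec K A l r) (exists_valid K A r)

lemma L_valid (K : Int) (A : List Int) (r : Nat) : valid K A (L K A r) r :=
  @Nat.find_spec (fun l => valid K A l r) (fun l => validDec K A l r) (exists_valid K A r)

lemma L_le (K : Int) (A : List Int) (r : Nat) : L K A r ≤ r :=
  @Nat.find_min' (fun l => valid K A l r) (fun l => validDec K A l r) (exists_valid K A r) _
    (valid_refl K A r)

lemma valid_iff_L_le {K : Int} {A : List Int} {l r : Nat} :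
    valid K A l r ↔ L K A r ≤ l := by
  constructor
  · intro h
    exact @Nat.find_min' (fun l => valid K A l r) (fun l => validDec K A l r)
      (exists_valid K A r) _ h
  · intro h
    exact valid_mono h le_rfl (L_valid K A r)

lemma L_mono {K : Int} {A : List Int} {r r' : Nat} (h : r ≤ r') :
    L K A r ≤ L K A r' := by
  rw [← valid_iff_L_le]
  exact valid_mono le_rfl h (L_valid K A r')

-- Attained bounds of the window A[l..r]: lo/hi bound every element and are attained.
def Bnds (A : List Int) (l r : Nat) (lo hi : Int) : Prop :=
  (∀ t, l ≤ t → t ≤ r → lo ≤ g A t ∧ g A t ≤ hi) ∧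
  (∃ p, l ≤ p ∧ p ≤ r ∧ g A p = hi) ∧ (∃ q, l ≤ q ∧ q ≤ r ∧ g A q = lo)

lemma bnds_single (A : List Int) (i : Nat) : Bnds A i i (g A i) (g A i) :=
  ⟨fun t h1 h2 => by have : t = i := by omega
                     subst this; exact ⟨le_rfl, le_rfl⟩,
   ⟨i, le_rfl, le_rfl, rfl⟩, ⟨i, le_rfl, le_rfl, rfl⟩⟩

lemma bnds_valid_of_le {K : Int} {A : List Int} {l r : Nat} {lo hi : Int}
    (h : Bnds A l r lo hi) (hle : hi - lo ≤ ke K) : valid K A l r := by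
  intro p hp q hq hlp hlq
  have h1 := h.1 p hlp (by omega)
  have h2 := h.1 q hlq (by omega)
  omega

lemma bnds_le_of_valid {K : Int} {A : List Int} {l r : Nat} {lo hi : Int}
    (h : Bnds A l r lo hi) (hv : valid K A l r) : hi - lo ≤ ke K := by
  obtain ⟨p, hp1, hp2, hp3⟩ := h.2.1
  obtain ⟨q, hq1, hq2, hq3⟩ := h.2.2
  have := hv p (by omega) q (by omega) hp1 hq1
  omega

lemma not_valid_of_gap {K : Int} {A : List Int} {l r p q : Nat}
    (hp1 : l ≤ p) (hp2 : p ≤ r) (hq1 : l ≤ q) (hq2 : q ≤ r)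
    (hgap : g A p - g A q > ke K) : ¬ valid K A l r := by
  intro hv
  have := hv p (by omega) q (by omega) hp1 hq1
  omega

lemma gap_of_KB {K a b : Int} (h1 : a < b) (h2 : b - a > K) : b - a > ke K := by
  unfold ke; omega

-- window extension lemmas (one index added on the left or right)
lemma bnds_ext_left {A : List Int} {l r : Nat} {lo hi a : Int}
    (h : Bnds A (l + 1) r lo hi) (ha : a = g A l) :
    (a < lo → Bnds A l r a hi) ∧ (a > hi → Bnds A l r lo a) ∧
    (lo ≤ a → a ≤ hi → Bnds A l r lo hi) := by
  obtain ⟨hb, ⟨p, hp1, hp2, hp3⟩, ⟨q, hq1, hq2, hq3⟩⟩ := h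
  refine ⟨fun hlt => ⟨?_, ⟨p, by omega, hp2, hp3⟩, ⟨l, le_rfl, by omega, ha.symm⟩⟩,
          fun hgt => ⟨?_, ⟨l, le_rfl, by omega, ha.symm⟩, ⟨q, by omega, hq2, hq3⟩⟩,
          fun h1 h2 => ⟨?_, ⟨p, by omega, hp2, hp3⟩, ⟨q, by omega, hq2, hq3⟩⟩⟩ <;>
  · intro t ht1 ht2
    rcases Nat.eq_or_lt_of_le ht1 with he | hlt'
    · subst he
      have hlo := hb q hq1 hq2
      have hhi := hb p hp1 hp2
      omega
    · have := hb t (by omega) ht2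
      omega

lemma bnds_ext_right {A : List Int} {l r : Nat} {lo hi a : Int}
    (h : Bnds A l r lo hi) (ha : a = g A (r + 1)) :
    (a < lo → Bnds A l (r + 1) a hi) ∧ (a > hi → Bnds A l (r + 1) lo a) ∧
    (lo ≤ a → a ≤ hi → Bnds A l (r + 1) lo hi) := by
  obtain ⟨hb, ⟨p, hp1, hp2, hp3⟩, ⟨q, hq1, hq2, hq3⟩⟩ := h
  refine ⟨fun hlt => ⟨?_, ⟨p, hp1, by omega, hp3⟩, ⟨r + 1, by omega, le_rfl, ha.symm⟩⟩,
          fun hgt => ⟨?_, ⟨r + 1, by omega, le_rfl, ha.symm⟩, ⟨q, hq1, by omega, hq3⟩⟩,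
          fun h1 h2 => ⟨?_, ⟨p, hp1, by omega, hp3⟩, ⟨q, hq1, by omega, hq3⟩⟩⟩ <;>
  · intro t ht1 ht2
    rcases Nat.lt_or_ge t (r + 1) with hlt' | hge
    · have := hb t ht1 (by omega)
      omega
    · have : t = r + 1 := by omega
      subst this
      have hlo := hb q hq1 hq2
      have hhi := hb p hp1 hp2
      omega

-- partial sums of the reference count
def S (K : Int) (A : List Int) (m : Nat) : Int :=
  ∑ r ∈ Finset.range m, ((r : Int) + 1 - (L K A r : Int))

-- ===== A-side: loop specifications =====
lemma backLoop_succ (K : Int) (A : List Int) (j : Nat) (lo hi : Int) (cnt : Nat) :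
    backLoop K A (j + 1) lo hi cnt =
      if g A j < lo then
        (if hi - g A j > K then (lo, hi, cnt) else backLoop K A j (g A j) hi (cnt + 1))
      else if g A j > hi then
        (if g A j - lo > K then (lo, hi, cnt) else backLoop K A j lo (g A j) (cnt + 1))
      else backLoop K A j lo hi (cnt + 1) := rfl

lemma fwdLoop_succ (K : Int) (A : List Int) (fuel j : Nat) (lo hi : Int) (cnt : Nat) :
    fwdLoop K A (fuel + 1) j lo hi cnt =
      if g A j < lo then
        (if hi - g A j > K then (lo, hi, cnt) else fwdLoop K A fuel (j + 1) (g A j) hi (cnt + 1))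
      else if g A j > hi then
        (if g A j - lo > K then (lo, hi, cnt) else fwdLoop K A fuel (j + 1) lo (g A j) (cnt + 1))
      else fwdLoop K A fuel (j + 1) lo hi (cnt + 1) := rfl

lemma bnds_lo_le_hi {A : List Int} {l r : Nat} {lo hi : Int} (h : Bnds A l r lo hi) :
    lo ≤ hi := by
  obtain ⟨hbd, _, ⟨q, hq1, hq2, hq3⟩⟩ := h
  have := hbd q hq1 hq2
  omega

lemma back_spec (K : Int) (A : List Int) (i : Nat) :
    ∀ (j : Nat) (lo hi : Int) (cnt : Nat), j ≤ i → Bnds A j i lo hi → valid K A j i →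
    ∃ j' lo' hi', backLoop K A j lo hi cnt = (lo', hi', cnt + (j - j')) ∧ j' ≤ j ∧
      Bnds A j' i lo' hi' ∧ valid K A j' i ∧ (j' = 0 ∨ ¬ valid K A (j' - 1) i) := by
  intro j
  induction j with
  | zero =>
    intro lo hi cnt hji hb hv
    exact ⟨0, lo, hi, by simp [backLoop], le_rfl, hb, hv, Or.inl rfl⟩
  | succ j ih =>
    intro lo hi cnt hji hb hv
    have hobn := bnds_ext_left hb rfl
    have hlohi : lo ≤ hi := bnds_lo_le_hi hb
    by_cases h1 : g A j < lo
    · by_cases h2 : hi - g A j > K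
      · refine ⟨j + 1, lo, hi, ?_, le_rfl, hb, hv, Or.inr ?_⟩
        · rw [backLoop_succ, if_pos h1, if_pos h2]
          simp
        · obtain ⟨_, ⟨p, hp1, hp2, hp3⟩, _⟩ := hb
          simp only [Nat.add_sub_cancel]
          exact not_valid_of_gap (p := p) (q := j) (by omega) hp2 le_rfl (by omega)
            (by rw [hp3]; exact gap_of_KB (by omega) h2)
      · have hb' : Bnds A j i (g A j) hi := hobn.1 h1
        have hv' : valid K A j i := bnds_valid_of_le hb' (by unfold ke; omega)
        obtain ⟨j', lo', hi', heq, hle, hb'', hv'', hlast⟩ :=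
          ih (g A j) hi (cnt + 1) (by omega) hb' hv'
        refine ⟨j', lo', hi', ?_, by omega, hb'', hv'', hlast⟩
        rw [backLoop_succ, if_pos h1, if_neg h2, heq]
        congr 2
        omega
    · by_cases h2 : g A j > hi
      · by_cases h3 : g A j - lo > K
        · refine ⟨j + 1, lo, hi, ?_, le_rfl, hb, hv, Or.inr ?_⟩
          · rw [backLoop_succ, if_neg h1, if_pos h2, if_pos h3]
            simp
          · obtain ⟨_, _, ⟨q, hq1, hq2, hq3⟩⟩ := hb
            simp only [Nat.add_sub_cancel]
            exact not_valid_of_gap (p := j) (q := q) le_rfl (by omega) (by omega) hq2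
              (by rw [hq3]; exact gap_of_KB (by omega) h3)
        · have hb' : Bnds A j i lo (g A j) := hobn.2.1 h2
          have hv' : valid K A j i := bnds_valid_of_le hb' (by unfold ke; omega)
          obtain ⟨j', lo', hi', heq, hle, hb'', hv'', hlast⟩ :=
            ih lo (g A j) (cnt + 1) (by omega) hb' hv'
          refine ⟨j', lo', hi', ?_, by omega, hb'', hv'', hlast⟩
          rw [backLoop_succ, if_neg h1, if_pos h2, if_neg h3, heq]
          congr 2
          omega
      · have hb' : Bnds A j i lo hi := hobn.2.2 (by omega) (by omega)
        have hv' : valid K A j i := bnds_valid_of_le hb' (bnds_le_of_valid hb hv)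
        obtain ⟨j', lo', hi', heq, hle, hb'', hv'', hlast⟩ :=
          ih lo hi (cnt + 1) (by omega) hb' hv'
        refine ⟨j', lo', hi', ?_, by omega, hb'', hv'', hlast⟩
        rw [backLoop_succ, if_neg h1, if_neg h2, heq]
        congr 2
        omega

lemma fwd_spec (K : Int) (A : List Int) (i w : Nat) (hwi : w ≤ i) :
    ∀ (fuel j : Nat) (lo hi : Int) (cnt : Nat), fuel = A.length - j → i ≤ j → j ≤ A.length →
    Bnds A w (max (j - 1) i) lo hi → valid K A w (max (j - 1) i) →
    ∃ je lo' hi', fwdLoop K A fuel j lo hi cnt = (lo', hi', cnt + (je - j)) ∧ j ≤ je ∧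
      je ≤ A.length ∧ valid K A w (max (je - 1) i) ∧ (je = A.length ∨ ¬ valid K A w je) := by
  intro fuel
  induction fuel with
  | zero =>
    intro j lo hi cnt hf hij hjn hb hv
    have : j = A.length := by omega
    exact ⟨j, lo, hi, by simp [fwdLoop], le_rfl, by omega, hv, Or.inl this⟩
  | succ fuel ih =>
    intro j lo hi cnt hf hij hjn hb hv
    have hjn' : j < A.length := by omega
    have hmax : max (j - 1) i + 1 = j ∨ (j = i ∧ max (j - 1) i = i) := by omega
    have hlohi : lo ≤ hi := bnds_lo_le_hi hb
    have hjin : max (j - 1) i ≤ j := by omega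
    have hextend : ∀ lo' hi', Bnds A w (max (j - 1) i) lo' hi' → g A j ≤ hi' → lo' ≤ g A j →
        Bnds A w (max (j + 1 - 1) i) lo' hi' := by
      intro lo' hi' hbb hh1 hh2
      rcases hmax with hc | ⟨hc1, hc2⟩
      · have hx := (bnds_ext_right hbb (show g A j = g A (max (j - 1) i + 1) by rw [hc])).2.2
          hh2 hh1
        have he : max (j + 1 - 1) i = max (j - 1) i + 1 := by omega
        rw [he]; exact hx
      · have he : max (j + 1 - 1) i = max (j - 1) i := by omega
        rw [he]; exact hbb
    have hextlo : g A j < lo → Bnds A w (max (j + 1 - 1) i) (g A j) hi := by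
      intro hh1
      rcases hmax with hc | ⟨hc1, hc2⟩
      · have hx := (bnds_ext_right hb (show g A j = g A (max (j - 1) i + 1) by rw [hc])).1 hh1
        have he : max (j + 1 - 1) i = max (j - 1) i + 1 := by omega
        rw [he]; exact hx
      · exfalso
        have := hb.1 i hwi (by omega)
        rw [hc1] at hh1
        omega
    have hexthi : g A j > hi → Bnds A w (max (j + 1 - 1) i) lo (g A j) := by
      intro hh1
      rcases hmax with hc | ⟨hc1, hc2⟩
      · have hx := (bnds_ext_right hb (show g A j = g A (max (j - 1) i + 1) by rw [hc])).2.1 hh1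
        have he : max (j + 1 - 1) i = max (j - 1) i + 1 := by omega
        rw [he]; exact hx
      · exfalso
        have := hb.1 i hwi (by omega)
        rw [hc1] at hh1
        omega
    by_cases h1 : g A j < lo
    · by_cases h2 : hi - g A j > K
      · refine ⟨j, lo, hi, ?_, le_rfl, by omega, hv, Or.inr ?_⟩
        · rw [fwdLoop_succ, if_pos h1, if_pos h2]
          simp
        · obtain ⟨_, ⟨p, hp1, hp2, hp3⟩, _⟩ := hb
          exact not_valid_of_gap (p := p) (q := j) hp1 (by omega) (by omega) le_rfl
            (by rw [hp3]; exact gap_of_KB (by omega) h2)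
      · have hb' := hextlo h1
        have hv' : valid K A w (max (j + 1 - 1) i) :=
          bnds_valid_of_le hb' (by unfold ke; omega)
        obtain ⟨je, lo', hi', heq, hle, hjen, hv'', hlast⟩ :=
          ih (j + 1) (g A j) hi (cnt + 1) (by omega) (by omega) (by omega) hb' hv'
        refine ⟨je, lo', hi', ?_, by omega, hjen, hv'', hlast⟩
        rw [fwdLoop_succ, if_pos h1, if_neg h2, heq]
        congr 2
        omega
    · by_cases h2 : g A j > hi
      · by_cases h3 : g A j - lo > K
        · refine ⟨j, lo, hi, ?_, le_rfl, by omega, hv, Or.inr ?_⟩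
          · rw [fwdLoop_succ, if_neg h1, if_pos h2, if_pos h3]
            simp
          · obtain ⟨_, _, ⟨q, hq1, hq2, hq3⟩⟩ := hb
            exact not_valid_of_gap (p := j) (q := q) (by omega) le_rfl hq1 (by omega)
              (by rw [hq3]; exact gap_of_KB (by omega) h3)
        · have hb' := hexthi h2
          have hv' : valid K A w (max (j + 1 - 1) i) :=
            bnds_valid_of_le hb' (by unfold ke; omega)
          obtain ⟨je, lo', hi', heq, hle, hjen, hv'', hlast⟩ :=
            ih (j + 1) lo (g A j) (cnt + 1) (by omega) (by omega) (by omega) hb' hv'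
          refine ⟨je, lo', hi', ?_, by omega, hjen, hv'', hlast⟩
          rw [fwdLoop_succ, if_neg h1, if_pos h2, if_neg h3, heq]
          congr 2
          omega
      · have hb' := hextend lo hi hb (by omega) (by omega)
        have hv' : valid K A w (max (j + 1 - 1) i) :=
          bnds_valid_of_le hb' (bnds_le_of_valid hb hv)
        obtain ⟨je, lo', hi', heq, hle, hjen, hv'', hlast⟩ :=
          ih (j + 1) lo hi (cnt + 1) (by omega) (by omega) (by omega) hb' hv'
        refine ⟨je, lo', hi', ?_, by omega, hjen, hv'', hlast⟩
        rw [fwdLoop_succ, if_neg h1, if_neg h2, heq]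
        congr 2
        omega

-- ===== A-side: triangular numbers and the outer loop =====
lemma two_mul_pyTri (x : Int) : 2 * pyTri x = x * (x + 1) := by
  obtain ⟨k, hk⟩ := Int.even_mul_succ_self x
  unfold pyTri
  rw [hk, show k + k = k * 2 by ring,
    PySem.Int.floordiv_eq_ediv_of_pos (by omega : (0:Int) < 2), Int.mul_ediv_cancel _ (by omega)]
  ring

lemma pyTri_step (x : Int) : pyTri (x + 1) - pyTri x = x + 1 := by
  have h1 := two_mul_pyTri (x + 1)
  have h2 := two_mul_pyTri x
  have h3 : (x + 1) * (x + 1 + 1) = x * (x + 1) + 2 * x + 2 := by ring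
  linarith

lemma S_zero (K : Int) (A : List Int) : S K A 0 = 0 := by simp [S]

lemma S_succ (K : Int) (A : List Int) (m : Nat) :
    S K A (m + 1) = S K A m + ((m : Int) + 1 - (L K A m : Int)) := by
  unfold S
  rw [Finset.sum_range_succ]

lemma S_block (K : Int) (A : List Int) (i j' : Nat) :
    ∀ d : Nat, (∀ r, i ≤ r → r < i + d → L K A r = j') →
    S K A (i + d) = S K A i - pyTri ((i : Int) - (j' : Int)) +
      pyTri ((d : Int) + ((i : Int) - (j' : Int))) := by
  intro d
  induction d with
  | zero => intro _; simp
  | succ d ih =>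
    intro hL
    have hLd : L K A (i + d) = j' := hL (i + d) (by omega) (by omega)
    rw [show i + (d + 1) = (i + d) + 1 by omega, S_succ,
      ih (fun r h1 h2 => hL r h1 (by omega)), hLd]
    have hstep := pyTri_step ((d : Int) + ((i : Int) - (j' : Int)))
    push_cast
    rw [show ((d : Int) + 1 + ((i : Int) - (j' : Int))) = ((d : Int) + ((i : Int) - (j' : Int))) + 1 by ring]
    linarith

lemma outerLoop_succ (K : Int) (A : List Int) (fuel i : Nat) (res : Int) :
    outerLoop K A (fuel + 1) i res =
      if i < A.length then
        (match backLoop K A i (g A i) (g A i) 0 with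
         | (lo, hi, b) =>
           match fwdLoop K A (A.length - i) i lo hi 0 with
           | (_, _, f) => outerLoop K A fuel (i + f) (res - pyTri (b : Int) + pyTri ((f : Int) + (b : Int))))
      else res := rfl

lemma outer_spec (K : Int) (A : List Int) :
    ∀ (fuel i : Nat) (res : Int), i ≤ A.length → A.length - i ≤ fuel → res = S K A i →
    outerLoop K A fuel i res = S K A A.length := by
  intro fuel
  induction fuel with
  | zero =>
    intro i res h1 h2 h3
    have : i = A.length := by omega
    subst this
    simpa [outerLoop] using h3
  | succ fuel ih =>
    intro i res h1 h2 h3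
    by_cases hin : i < A.length
    · obtain ⟨j', lo', hi', heqB, hj'le, hbB, hvB, hlastB⟩ :=
        back_spec K A i i (g A i) (g A i) 0 le_rfl (bnds_single A i) (valid_refl K A i)
      have hmaxi : max (i - 1) i = i := by omega
      obtain ⟨je, lo2, hi2, heqF, hije, hjen, hvF, hlastF⟩ :=
        fwd_spec K A i j' hj'le (A.length - i) i lo' hi' 0 rfl le_rfl (by omega)
          (by rw [hmaxi]; exact hbB) (by rw [hmaxi]; exact hvB)
      -- the forward loop advances at least once
      have hjei : i < je := by
        rcases Nat.eq_or_lt_of_le hije with he | h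
        · exfalso
          rcases hlastF with hF | hF
          · omega
          · rw [← he] at hF
            exact hF hvB
        · exact h
      -- every endpoint in the block has left end j'
      have hLr : ∀ r, i ≤ r → r < je → L K A r = j' := by
        intro r hr1 hr2
        have hvr : valid K A j' r := by
          refine valid_mono le_rfl ?_ hvF
          omega
        have hle1 : L K A r ≤ j' := valid_iff_L_le.mp hvr
        rcases Nat.eq_or_lt_of_le hle1 with he | hlt
        · omega
        · exfalso
          rcases hlastB with h0 | hnv
          · omega
          · exact hnv (valid_mono (by omega) hr1 (L_valid K A r))
      rw [outerLoop_succ, if_pos hin, heqB]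
      dsimp only
      rw [heqF]
      dsimp only
      simp only [Nat.zero_add]
      have harith : res - pyTri ((i - j' : Nat) : Int) +
          pyTri (((je - i : Nat) : Int) + ((i - j' : Nat) : Int)) = S K A je := by
        have := S_block K A i j' (je - i) (by
          intro r hr1 hr2
          exact hLr r hr1 (by omega))
        rw [show i + (je - i) = je by omega] at this
        rw [h3, this]
        have hc1 : ((i - j' : Nat) : Int) = (i : Int) - (j' : Int) := by push_cast [hj'le]; ring
        rw [hc1]
      rw [harith, show i + (je - i) = je by omega]
      exact ih je _ hjen (by omega) rfl
    · have : i = A.length := by omega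
      subst this
      rw [outerLoop_succ, if_neg hin]
      exact h3

lemma A_eq_S (K : Int) (A : List Int) :
    solution_version_2 K A = S K A A.length := by
  unfold solution_version_2
  exact outer_spec K A A.length 0 0 (by omega) (by omega) (S_zero K A).symm

-- ===== B-side: cached-min/max stacks =====
def vals (s : List (Int × Int × Int)) : List Int := s.map (fun e => e.1)

def fmax (a : Int) (l : List Int) : Int := l.foldl max a
def fmin (a : Int) (l : List Int) : Int := l.foldl min a

lemma fmax_max (l : List Int) : ∀ a b : Int, fmax (max a b) l = max a (fmax b l) := by
  induction l with
  | nil => intro a b; rfl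
  | cons c l ih =>
    intro a b
    show fmax (max (max a b) c) l = max a (fmax (max b c) l)
    rw [max_assoc, ih]

lemma fmin_min (l : List Int) : ∀ a b : Int, fmin (min a b) l = min a (fmin b l) := by
  induction l with
  | nil => intro a b; rfl
  | cons c l ih =>
    intro a b
    show fmin (min (min a b) c) l = min a (fmin (min b c) l)
    rw [min_assoc, ih]

lemma le_fmax_self (l : List Int) : ∀ a : Int, a ≤ fmax a l := by
  induction l with
  | nil => intro a; exact le_rfl
  | cons c l ih =>
    intro a
    exact le_trans (le_max_left a c) (ih (max a c))

lemma fmin_le_self (l : List Int) : ∀ a : Int, fmin a l ≤ a := by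
  induction l with
  | nil => intro a; exact le_rfl
  | cons c l ih =>
    intro a
    exact le_trans (ih (min a c)) (min_le_left a c)

lemma le_fmax_mem {l : List Int} {x : Int} (h : x ∈ l) (a : Int) : x ≤ fmax a l := by
  induction l generalizing a with
  | nil => cases h
  | cons c l ih =>
    rcases List.mem_cons.mp h with he | hm
    · subst he
      exact le_trans (le_max_right a x) (le_fmax_self l (max a x))
    · exact ih hm (max a c)

lemma fmin_le_mem {l : List Int} {x : Int} (h : x ∈ l) (a : Int) : fmin a l ≤ x := by
  induction l generalizing a with
  | nil => cases h
  | cons c l ih =>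
    rcases List.mem_cons.mp h with he | hm
    · subst he
      exact le_trans (fmin_le_self l (min a x)) (min_le_right a x)
    · exact ih hm (min a c)

lemma fmax_mem_or (l : List Int) : ∀ a : Int, fmax a l = a ∨ fmax a l ∈ l := by
  induction l with
  | nil => intro a; exact Or.inl rfl
  | cons c l ih =>
    intro a
    rcases ih (max a c) with h | h
    · rcases max_choice a c with hc | hc
      · exact Or.inl (by rw [show fmax a (c :: l) = fmax (max a c) l from rfl, h, hc])
      · exact Or.inr (by rw [show fmax a (c :: l) = fmax (max a c) l from rfl, h, hc]; exact List.mem_cons_self ..)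
    · exact Or.inr (List.mem_cons_of_mem c h)

lemma fmin_mem_or (l : List Int) : ∀ a : Int, fmin a l = a ∨ fmin a l ∈ l := by
  induction l with
  | nil => intro a; exact Or.inl rfl
  | cons c l ih =>
    intro a
    rcases ih (min a c) with h | h
    · rcases min_choice a c with hc | hc
      · exact Or.inl (by rw [show fmin a (c :: l) = fmin (min a c) l from rfl, h, hc])
      · exact Or.inr (by rw [show fmin a (c :: l) = fmin (min a c) l from rfl, h, hc]; exact List.mem_cons_self ..)
    · exact Or.inr (List.mem_cons_of_mem c h)

-- stack well-formedness: every entry caches the max/min of the stack from it down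
def WFq : List (Int × Int × Int) → Prop
  | [] => True
  | e :: t => WFq t ∧ e.2.1 = fmax e.1 (vals t) ∧ e.2.2 = fmin e.1 (vals t)

lemma pushQ_wf {s : List (Int × Int × Int)} (h : WFq s) (v : Int) :
    WFq (pushQ v s) ∧ vals (pushQ v s) = v :: vals s := by
  cases s with
  | nil => exact ⟨⟨trivial, rfl, rfl⟩, rfl⟩
  | cons e t =>
    obtain ⟨w, m, n⟩ := e
    obtain ⟨ht, hm, hn⟩ := h
    dsimp only at hm hn
    refine ⟨⟨⟨ht, hm, hn⟩, ?_, ?_⟩, rfl⟩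
    · show max v m = fmax v (vals ((w, m, n) :: t))
      rw [show vals ((w, m, n) :: t) = w :: vals t from rfl,
        show fmax v (w :: vals t) = fmax (max v w) (vals t) from rfl, fmax_max, hm]
    · show min v n = fmin v (vals ((w, m, n) :: t))
      rw [show vals ((w, m, n) :: t) = w :: vals t from rfl,
        show fmin v (w :: vals t) = fmin (min v w) (vals t) from rfl, fmin_min, hn]

lemma moveAll_wf : ∀ (b f : List (Int × Int × Int)), WFq f →
    WFq (moveAll b f) ∧ vals (moveAll b f) = (vals b).reverse ++ vals f := by
  intro b
  induction b with
  | nil => intro f hf; exact ⟨hf, by simp [moveAll, vals]⟩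
  | cons e t ih =>
    intro f hf
    obtain ⟨hw, hv⟩ := pushQ_wf hf e.1
    obtain ⟨hw', hv'⟩ := ih (pushQ e.1 f) hw
    refine ⟨hw', ?_⟩
    rw [show moveAll (e :: t) f = moveAll t (pushQ e.1 f) from rfl, hv', hv]
    simp [vals]

lemma vals_nil : vals ([] : List (Int × Int × Int)) = [] := rfl

-- the window A[l..m-1] as a value list
def seg (A : List Int) (l m : Nat) : List Int := (List.range' l (m - l)).map (g A)

lemma mem_seg {A : List Int} {l m : Nat} {x : Int} :
    x ∈ seg A l m ↔ ∃ t, l ≤ t ∧ t < m ∧ g A t = x := by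
  simp only [seg, List.mem_map, List.mem_range'_1]
  constructor
  · rintro ⟨t, ⟨h1, h2⟩, h3⟩
    exact ⟨t, h1, by omega, h3⟩
  · rintro ⟨t, h1, h2, h3⟩
    exact ⟨t, ⟨h1, by omega⟩, h3⟩

lemma seg_cons {A : List Int} {l m : Nat} (h : l < m) :
    seg A l m = g A l :: seg A (l + 1) m := by
  unfold seg
  rw [show m - l = (m - (l + 1)) + 1 by omega, List.range'_succ]
  rfl

lemma seg_snoc {A : List Int} {l m : Nat} (h : l ≤ m) :
    seg A l (m + 1) = seg A l m ++ [g A m] := by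
  unfold seg
  rw [show m + 1 - l = (m - l) + 1 by omega, List.range'_concat,
    show l + 1 * (m - l) = m by omega]
  simp

lemma seg_self (A : List Int) (l : Nat) : seg A l l = [] := by simp [seg]

-- the queue read gives attained bounds of the window
lemma combo_bnds {A : List Int} {f b : List (Int × Int × Int)} {l r : Nat}
    (hf : WFq f) (hb : WFq b) (hc : vals f ++ (vals b).reverse = seg A l (r + 1))
    (hlr : l ≤ r) : Bnds A l r (comboQ f b).2 (comboQ f b).1 := by
  have hbnd : (∀ x ∈ vals f ++ (vals b).reverse, x ≤ (comboQ f b).1 ∧ (comboQ f b).2 ≤ x) ∧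
      (comboQ f b).1 ∈ vals f ++ (vals b).reverse ∧
      (comboQ f b).2 ∈ vals f ++ (vals b).reverse := by
    match f, b with
    | [], [] =>
      exfalso
      have : (g A l) ∈ seg A l (r + 1) := by
        rw [seg_cons (by omega)]; exact List.mem_cons_self ..
      rw [← hc] at this
      simp [vals] at this
    | x :: ft, [] =>
      obtain ⟨hft, hxm, hxn⟩ := hf
      have hv : vals (x :: ft) = x.1 :: vals ft := rfl
      refine ⟨?_, ?_, ?_⟩
      · intro u hu
        simp only [vals_nil, List.reverse_nil, List.append_nil] at hu ⊢
        rw [hv] at hu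
        show u ≤ (x.2.1 : Int) ∧ (x.2.2 : Int) ≤ u
        rcases List.mem_cons.mp hu with he | hm
        · subst he
          exact ⟨hxm ▸ le_fmax_self _ _, hxn ▸ fmin_le_self _ _⟩
        · exact ⟨hxm ▸ le_fmax_mem hm _, hxn ▸ fmin_le_mem hm _⟩
      · show (x.2.1 : Int) ∈ _
        simp only [vals_nil, List.reverse_nil, List.append_nil]
        rw [hv, hxm]
        rcases fmax_mem_or (vals ft) x.1 with h | h
        · rw [h]; exact List.mem_cons_self ..
        · exact List.mem_cons_of_mem _ h
      · show (x.2.2 : Int) ∈ _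
        simp only [vals_nil, List.reverse_nil, List.append_nil]
        rw [hv, hxn]
        rcases fmin_mem_or (vals ft) x.1 with h | h
        · rw [h]; exact List.mem_cons_self ..
        · exact List.mem_cons_of_mem _ h
    | [], y :: bt =>
      obtain ⟨hbt, hym, hyn⟩ := hb
      have hv : vals (y :: bt) = y.1 :: vals bt := rfl
      refine ⟨?_, ?_, ?_⟩
      · intro u hu
        simp only [vals_nil, List.nil_append, List.mem_reverse] at hu
        rw [hv] at hu
        show u ≤ (y.2.1 : Int) ∧ (y.2.2 : Int) ≤ u
        rcases List.mem_cons.mp hu with he | hm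
        · subst he
          exact ⟨hym ▸ le_fmax_self _ _, hyn ▸ fmin_le_self _ _⟩
        · exact ⟨hym ▸ le_fmax_mem hm _, hyn ▸ fmin_le_mem hm _⟩
      · show (y.2.1 : Int) ∈ _
        simp only [vals_nil, List.nil_append, List.mem_reverse]
        rw [hv, hym]
        rcases fmax_mem_or (vals bt) y.1 with h | h
        · rw [h]; exact List.mem_cons_self ..
        · exact List.mem_cons_of_mem _ h
      · show (y.2.2 : Int) ∈ _
        simp only [vals_nil, List.nil_append, List.mem_reverse]
        rw [hv, hyn]
        rcases fmin_mem_or (vals bt) y.1 with h | h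
        · rw [h]; exact List.mem_cons_self ..
        · exact List.mem_cons_of_mem _ h
    | x :: ft, y :: bt =>
      obtain ⟨hft, hxm, hxn⟩ := hf
      obtain ⟨hbt, hym, hyn⟩ := hb
      have hvf : vals (x :: ft) = x.1 :: vals ft := rfl
      have hvb : vals (y :: bt) = y.1 :: vals bt := rfl
      refine ⟨?_, ?_, ?_⟩
      · intro u hu
        show u ≤ max x.2.1 y.2.1 ∧ min x.2.2 y.2.2 ≤ u
        rcases List.mem_append.mp hu with hm | hm
        · rw [hvf] at hm
          rcases List.mem_cons.mp hm with he | hm'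
          · subst he
            exact ⟨le_trans (hxm ▸ le_fmax_self _ _) (le_max_left _ _),
              le_trans (min_le_left _ _) (hxn ▸ fmin_le_self _ _)⟩
          · exact ⟨le_trans (hxm ▸ le_fmax_mem hm' _) (le_max_left _ _),
              le_trans (min_le_left _ _) (hxn ▸ fmin_le_mem hm' _)⟩
        · rw [List.mem_reverse, hvb] at hm
          rcases List.mem_cons.mp hm with he | hm'
          · subst he
            exact ⟨le_trans (hym ▸ le_fmax_self _ _) (le_max_right _ _),
              le_trans (min_le_right _ _) (hyn ▸ fmin_le_self _ _)⟩
          · exact ⟨le_trans (hym ▸ le_fmax_mem hm' _) (le_max_right _ _),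
              le_trans (min_le_right _ _) (hyn ▸ fmin_le_mem hm' _)⟩
      · show max x.2.1 y.2.1 ∈ _
        rcases max_choice x.2.1 y.2.1 with h | h <;> rw [h]
        · apply List.mem_append_left
          rw [hvf, hxm]
          rcases fmax_mem_or (vals ft) x.1 with h' | h'
          · rw [h']; exact List.mem_cons_self ..
          · exact List.mem_cons_of_mem _ h'
        · apply List.mem_append_right
          rw [List.mem_reverse, hvb, hym]
          rcases fmax_mem_or (vals bt) y.1 with h' | h'
          · rw [h']; exact List.mem_cons_self ..
          · exact List.mem_cons_of_mem _ h'
      · show min x.2.2 y.2.2 ∈ _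
        rcases min_choice x.2.2 y.2.2 with h | h <;> rw [h]
        · apply List.mem_append_left
          rw [hvf, hxn]
          rcases fmin_mem_or (vals ft) x.1 with h' | h'
          · rw [h']; exact List.mem_cons_self ..
          · exact List.mem_cons_of_mem _ h'
        · apply List.mem_append_right
          rw [List.mem_reverse, hvb, hyn]
          rcases fmin_mem_or (vals bt) y.1 with h' | h'
          · rw [h']; exact List.mem_cons_self ..
          · exact List.mem_cons_of_mem _ h'
  obtain ⟨hball, hmx, hmn⟩ := hbnd
  rw [hc] at hball hmx hmn
  refine ⟨?_, ?_, ?_⟩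
  · intro t ht1 ht2
    have : g A t ∈ seg A l (r + 1) := mem_seg.mpr ⟨t, ht1, by omega, rfl⟩
    have h := hball _ this
    exact ⟨h.2, h.1⟩
  · obtain ⟨p, hp1, hp2, hp3⟩ := mem_seg.mp hmx
    exact ⟨p, hp1, by omega, hp3⟩
  · obtain ⟨q, hq1, hq2, hq3⟩ := mem_seg.mp hmn
    exact ⟨q, hq1, by omega, hq3⟩

-- ===== B-side: loop specifications =====
lemma advLoop_succ (keff : Int) (fuel left : Nat) (f b : List (Int × Int × Int)) :
    advLoop keff (fuel + 1) left f b =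
      if (comboQ f b).1 - (comboQ f b).2 ≤ keff then (left, f, b)
      else match f with
        | [] => advLoop keff fuel (left + 1) (moveAll b []).tail []
        | _ :: ft => advLoop keff fuel (left + 1) ft b := rfl

lemma wfq_tail {e : Int × Int × Int} {t : List (Int × Int × Int)} (h : WFq (e :: t)) :
    WFq t := h.1

lemma adv_spec (K : Int) (A : List Int) (r : Nat) :
    ∀ (fuel left : Nat) (f b : List (Int × Int × Int)), WFq f → WFq b →
    vals f ++ (vals b).reverse = seg A left (r + 1) → left ≤ L K A r →
    L K A r - left < fuel →
    ∃ f' b', advLoop (ke K) fuel left f b = (L K A r, f', b') ∧ WFq f' ∧ WFq b' ∧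
      vals f' ++ (vals b').reverse = seg A (L K A r) (r + 1) := by
  intro fuel
  induction fuel with
  | zero => intro left f b _ _ _ _ h; omega
  | succ fuel ih =>
    intro left f b hf hb hc hle hfuel
    have hlr : left ≤ r := le_trans hle (L_le K A r)
    have hbnds := combo_bnds hf hb hc hlr
    by_cases hcond : (comboQ f b).1 - (comboQ f b).2 ≤ ke K
    · have hv : valid K A left r := bnds_valid_of_le hbnds hcond
      have : L K A r = left := le_antisymm (valid_iff_L_le.mp hv) hle
      rw [advLoop_succ, if_pos hcond, this]
      exact ⟨f, b, rfl, hf, hb, hc⟩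
    · have hnv : ¬ valid K A left r := fun hv => hcond (bnds_le_of_valid hbnds hv)
      have hlt : left < L K A r := by
        rcases Nat.lt_or_ge left (L K A r) with h | h
        · exact h
        · exact absurd (valid_iff_L_le.mpr h) hnv
      have hsegc : seg A left (r + 1) = g A left :: seg A (left + 1) (r + 1) :=
        seg_cons (by omega)
      rw [advLoop_succ, if_neg hcond]
      cases f with
      | nil =>
        obtain ⟨hmw, hmv⟩ := moveAll_wf b [] trivial
        have hmv' : vals (moveAll b []) = seg A left (r + 1) := by
          rw [hmv, vals_nil, List.append_nil]
          rw [vals_nil, List.nil_append] at hc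
          exact hc
        cases hm : moveAll b [] with
        | nil =>
          exfalso
          rw [hm] at hmv'
          rw [hsegc] at hmv'
          exact List.cons_ne_nil _ _ hmv'.symm
        | cons e t =>
          rw [hm] at hmw hmv'
          have hvt : vals t = seg A (left + 1) (r + 1) := by
            rw [hsegc] at hmv'
            have : e.1 :: vals t = g A left :: seg A (left + 1) (r + 1) := hmv'
            exact (List.cons.injEq _ _ _ _ ▸ this).2
          have := ih (left + 1) t [] (wfq_tail hmw) trivial
            (by rw [vals_nil, List.reverse_nil, List.append_nil]; exact hvt)
            (by omega) (by omega)
          simpa [hm] using this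
      | cons x ft =>
        have hvft : vals ft ++ (vals b).reverse = seg A (left + 1) (r + 1) := by
          have : (x.1 :: vals ft) ++ (vals b).reverse =
              g A left :: seg A (left + 1) (r + 1) := by
            rw [← hsegc, ← hc]; rfl
          simpa using (List.cons.injEq _ _ _ _ ▸ this).2
        exact ih (left + 1) ft b (wfq_tail hf) hb hvft (by omega) (by omega)

lemma mainLoop_cons (keff : Int) (v : Int) (rest : List Int) (right left : Nat)
    (f b : List (Int × Int × Int)) (res : Int) :
    mainLoop keff (v :: rest) right left f b res =
      (match advLoop keff (right + 1 - left) left f (pushQ v b) with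
       | (left', front', back') =>
         mainLoop keff rest (right + 1) left' front' back'
           (res + ((right : Int) - (left' : Int) + 1))) := rfl

lemma main_spec (K : Int) (A : List Int) :
    ∀ (rest : List Int) (right left : Nat) (f b : List (Int × Int × Int)) (res : Int),
    rest = A.drop right → right ≤ A.length → WFq f → WFq b →
    vals f ++ (vals b).reverse = seg A left right → left ≤ L K A right →
    res = S K A right →
    mainLoop (ke K) rest right left f b res = S K A A.length := by
  intro rest
  induction rest with
  | nil =>
    intro right left f b res hdrop hrn _ _ _ _ hres
    have : A.length ≤ right := by
      by_contra h
      have := congrArg List.length hdrop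
      simp at this
      omega
    have heq : right = A.length := by omega
    subst heq
    simpa [mainLoop] using hres
  | cons v rest' ih =>
    intro right left f b res hdrop hrn hf hb hc hle hres
    have hrlt : right < A.length := by
      by_contra h
      rw [List.drop_eq_nil_of_le (by omega)] at hdrop
      exact List.cons_ne_nil _ _ hdrop
    have hgv : g A right = v := by
      have h1 : (A.drop right)[0]? = some v := by rw [← hdrop]; simp
      rw [List.getElem?_drop, Nat.add_zero] at h1
      unfold g
      rw [List.getD_eq_getElem?_getD, h1]
      rfl
    have hdrop' : rest' = A.drop (right + 1) := by
      rw [← List.tail_drop, ← hdrop]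
      rfl
    have hLr : L K A right ≤ right := L_le K A right
    have hlr : left ≤ right := le_trans hle hLr
    obtain ⟨hwb', hvb'⟩ := pushQ_wf hb v
    have hc' : vals f ++ (vals (pushQ v b)).reverse = seg A left (right + 1) := by
      rw [hvb', List.reverse_cons, ← List.append_assoc, hc, ← hgv, seg_snoc hlr]
    obtain ⟨f', b', heqA, hwf', hwb'', hc''⟩ :=
      adv_spec K A right (right + 1 - left) left f (pushQ v b) hf hwb' hc' hle (by omega)
    rw [mainLoop_cons, heqA]
    dsimp only
    have hres' : res + ((right : Int) - (L K A right : Int) + 1) = S K A (right + 1) := by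
      rw [hres, S_succ]
      ring
    rw [hres']
    exact ih (right + 1) (L K A right) f' b' _ hdrop' (by omega) hwf' hwb'' hc''
      (L_mono (by omega)) rfl

lemma B_eq_S (K : Int) (A : List Int) :
    solution_version_2_alt K A = S K A A.length := by
  unfold solution_version_2_alt
  rw [show (if K > 0 then K else 0) = ke K by unfold ke; split_ifs <;> omega]
  exact main_spec K A A 0 0 [] [] 0 rfl (by omega) trivial trivial
    (by rw [vals_nil, List.reverse_nil, List.append_nil, seg_self]) (by omega) (S_zero K A).symm

-- ===== VERDICT (by name: the statement is the Claim_ definition above) =====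
theorem solution_version_2_spec : Claim_equal_solution_version_2 := by
  intro K A _
  unfold Spec_solution_version_2
  rw [A_eq_S]
  exact (B_eq_S K A).symm
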